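-- pv_equiv track=rewrite | github.com/Hariharan76/speech_to_text-final | server_api (1).py | remove_repeated_chars
-- ===== SOURCE A (Python) =====
-- def remove_repeated_chars(string):
--     new_string = ''
--     count = 0
--     prev_char = ''
--     for char in string:
--         if char == prev_char:
--             count += 1
--         else:
--             count = 1
--         if count <= 3:
--             new_string += char
--         elif count == 4:
--             new_string = new_string[:-3]
--         prev_char = char
--     return new_string
-- ===== SOURCE B (Python) =====
-- def remove_repeated_chars(string):
--     out = []
--     i = 0
--     n = len(string)
--     while i < n:
--         j = i
--         while j < n and string[j] == string[i]:
--             j += 1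
--         if j - i <= 3:
--             out.append(string[i] * (j - i))
--         i = j
--     return ''.join(out)
-- ===== Notes on version B (the rewrite author's own statement) =====
-- stated objective: alternative
-- what changed: B scans the string run-by-run with two pointers and emits each run only if its length is at most 3, replacing A's char-by-char append with its undo-last-three slice backtracking.
import Mathlib
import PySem

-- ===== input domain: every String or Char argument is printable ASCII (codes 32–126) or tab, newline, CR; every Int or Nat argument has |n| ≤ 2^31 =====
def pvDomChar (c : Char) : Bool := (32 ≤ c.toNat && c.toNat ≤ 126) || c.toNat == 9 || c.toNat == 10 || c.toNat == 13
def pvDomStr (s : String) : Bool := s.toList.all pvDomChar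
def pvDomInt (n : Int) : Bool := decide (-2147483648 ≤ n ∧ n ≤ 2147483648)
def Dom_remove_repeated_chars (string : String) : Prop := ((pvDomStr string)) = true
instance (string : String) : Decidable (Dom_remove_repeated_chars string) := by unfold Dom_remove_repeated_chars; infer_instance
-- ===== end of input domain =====

-- B scans the string run-by-run (two pointers) and keeps only runs of length ≤ 3,
-- replacing A's char-by-char append with undo-last-three backtracking; alternative decomposition, same cost.


-- ===== PORT A =====
-- state: (new_string as List Char, count, prev_char as Option Char; Python's initial '' is none)
def stepA (st : List Char × Int × Option Char) (char : Char) : List Char × Int × Option Char :=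
  let count : Int := if some char = st.2.2 then st.2.1 + 1 else 1
  let ns : List Char :=
    if count ≤ 3 then st.1 ++ [char]
    else if count = 4 then st.1.take (st.1.length - 3)  -- new_string[:-3]; Nat subtraction clamps at 0 like Python
    else st.1
  (ns, count, some char)

def remove_repeated_chars (string : String) : String :=
  String.mk (string.toList.foldl stepA ([], 0, none)).1

-- ===== PORT B =====
-- keep: the per-run contribution (run of length n kept iff n ≤ 3)
def keepB (c : Char) (n : Nat) : List Char :=
  if n ≤ 3 then List.replicate n c else []

-- the two-pointer run scan of Source B: the inner 'while string[j] == string[i]' is span/takeWhile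
def goB : List Char → List Char
  | [] => []
  | c :: rest =>
    keepB c (rest.takeWhile (· == c)).length.succ ++ goB (rest.dropWhile (· == c))
termination_by l => l.length
decreasing_by
  simp only [List.length_cons]
  exact Nat.lt_succ_of_le (List.length_dropWhile_le _ _)

def remove_repeated_chars_alt (string : String) : String :=
  String.mk (goB string.toList)

-- ===== PRECONDITION & SPEC =====
def Spec_remove_repeated_chars (string : String) (out : String) : Prop := out = remove_repeated_chars_alt string
instance (string : String) (out : String) : Decidable (Spec_remove_repeated_chars string out) := by unfold Spec_remove_repeated_chars; infer_instance

-- ===== CLAIM (what is proved, stated in full; the proofs are below) =====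
def Claim_equal_remove_repeated_chars : Prop := ∀ (string : String), Dom_remove_repeated_chars string → Spec_remove_repeated_chars string (remove_repeated_chars string)

-- ===== LEMMAS AND PROOFS =====

-- how stepA acts when the incoming char equals / differs from prev
theorem stepA_same (acc : List Char) (k : Int) (c : Char) :
    stepA (acc, k, some c) c
      = (if k + 1 ≤ 3 then acc ++ [c]
         else if k + 1 = 4 then acc.take (acc.length - 3) else acc, k + 1, some c) := by
  simp [stepA]

theorem stepA_new (acc : List Char) (k : Int) (p : Option Char) (c : Char) (h : p ≠ some c) :
    stepA (acc, k, p) c = (acc ++ [c], 1, some c) := by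
  have hne : (some c = p) = False := eq_false (fun hq => h hq.symm)
  simp [stepA, hne]

-- running A over a block of m further copies of c, starting mid-run with count j ≥ 1
theorem runLemmaA (c : Char) : ∀ (m j : Nat) (acc : List Char), 1 ≤ j →
    (List.replicate m c).foldl stepA (acc ++ keepB c j, (j : Int), some c)
      = (acc ++ keepB c (j + m), ((j + m : Nat) : Int), some c) := by
  intro m
  induction m with
  | zero => intro j acc hj; simp
  | succ m ih =>
    intro j acc hj
    rw [List.replicate_succ, List.foldl_cons, stepA_same]
    have hstep : (if (j : Int) + 1 ≤ 3 then (acc ++ keepB c j) ++ [c]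
         else if (j : Int) + 1 = 4 then (acc ++ keepB c j).take ((acc ++ keepB c j).length - 3)
         else acc ++ keepB c j)
        = acc ++ keepB c (j + 1) := by
      by_cases h2 : j ≤ 2
      · rw [if_pos (show (j : Int) + 1 ≤ 3 by omega)]
        rw [keepB, if_pos (show j ≤ 3 by omega), keepB, if_pos (show j + 1 ≤ 3 by omega)]
        rw [List.append_assoc, ← List.replicate_succ' (n := j)]
      · by_cases h4 : j = 3
        · rw [if_neg (show ¬ ((j : Int) + 1 ≤ 3) by omega),
              if_pos (show ((j : Int) + 1 = 4) by omega)]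
          rw [keepB, if_pos (show j ≤ 3 by omega), keepB,
              if_neg (show ¬ j + 1 ≤ 3 by omega), List.append_nil]
          rw [List.length_append, List.length_replicate,
              show acc.length + j - 3 = acc.length by omega, List.take_left]
        · rw [if_neg (show ¬ ((j : Int) + 1 ≤ 3) by omega),
              if_neg (show ¬ ((j : Int) + 1 = 4) by omega)]
          rw [keepB, if_neg (show ¬ j ≤ 3 by omega), keepB,
              if_neg (show ¬ j + 1 ≤ 3 by omega)]
    rw [hstep, show (j : Int) + 1 = ((j + 1 : Nat) : Int) by push_cast; ring,
       ih (j + 1) acc (by omega)]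
    rw [show j + 1 + m = j + (m + 1) by omega]

theorem takeWhile_eq_replicate (c : Char) (l : List Char) :
    l.takeWhile (· == c) = List.replicate (l.takeWhile (· == c)).length c := by
  apply List.eq_replicate_of_mem
  intro b hb
  have := List.mem_takeWhile_imp hb
  simpa [beq_iff_eq] using this

theorem head?_dropWhile_false (p : Char → Bool) :
    ∀ (l : List Char) (d : Char), (l.dropWhile p).head? = some d → p d = false := by
  intro l
  induction l with
  | nil => intro d h; simp at h
  | cons a t ih =>
    intro d h
    rw [List.dropWhile_cons] at h
    by_cases hp : p a = true
    · rw [if_pos hp] at h; exact ih d h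
    · rw [if_neg hp] at h
      rw [List.head?_cons] at h
      rw [← Option.some.inj h]
      exact eq_false_of_ne_true hp

theorem mainLemma : ∀ (s acc : List Char) (k : Int) (p : Option Char),
    (∀ c, s.head? = some c → p ≠ some c) →
    (s.foldl stepA (acc, k, p)).1 = acc ++ goB s := by
  intro s
  induction s using goB.induct with
  | case1 => intro acc k p _; simp [goB]
  | case2 c rest ih =>
    intro acc k p hp
    rw [List.foldl_cons, stepA_new acc k p c (hp c (by simp))]
    have h1 : keepB c 1 = [c] := rfl
    rw [← h1, show (1 : Int) = ((1 : Nat) : Int) by norm_num]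
    have hsplit : rest = rest.takeWhile (· == c) ++ rest.dropWhile (· == c) :=
      (List.takeWhile_append_dropWhile (p := (· == c)) (l := rest)).symm
    conv_lhs => rw [hsplit]
    rw [List.foldl_append]
    conv_lhs => rw [takeWhile_eq_replicate c rest]
    rw [runLemmaA c (rest.takeWhile (· == c)).length 1 acc (le_refl 1)]
    have hd : ∀ d, (rest.dropWhile (· == c)).head? = some d → (some c : Option Char) ≠ some d := by
      intro d hdd heq
      have := head?_dropWhile_false (p := (· == c)) rest d hdd
      rw [show d = c from (Option.some.inj heq).symm] at this
      simp at this
    rw [ih (acc ++ keepB c (1 + (rest.takeWhile (· == c)).length)) _ (some c) hd]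
    rw [goB, show (rest.takeWhile (· == c)).length.succ
          = 1 + (rest.takeWhile (· == c)).length by omega, List.append_assoc]

-- ===== VERDICT (by name: the statement is the Claim_ definition above) =====
theorem remove_repeated_chars_spec : Claim_equal_remove_repeated_chars := by
  intro s _
  unfold Spec_remove_repeated_chars remove_repeated_chars remove_repeated_chars_alt
  rw [mainLemma s.toList [] 0 none (by intro c _ h; cases h)]
  rfl
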